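-- pv_equiv track=rewrite | github.com/Matthieu5555/prospectus_reading | extractor/agents/planner_agent.py | _get_first_contiguous_block
-- ===== SOURCE A (Python) =====
-- def _get_first_contiguous_block(pages: list[int]) -> list[int]:
--     """Extract the first contiguous block of pages.
--
--     Given pages [5, 6, 75, 76, 77], returns [5, 6].
--     This filters out appendix mentions that aren't part of the fund section.
--     """
--     if not pages:
--         return []
--
--     result = [pages[0]]
--     for i in range(1, len(pages)):
--         if pages[i] == pages[i - 1] + 1:
--             result.append(pages[i])
--         else:
--             # Gap found - stop at first block
--             break
--     return result
-- ===== SOURCE B (Python) =====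
-- def _get_first_contiguous_block(pages: list[int]) -> list[int]:
--     n = len(pages)
--     cut = next((i for i in range(1, n) if pages[i] != pages[i - 1] + 1), n)
--     return pages[:cut]
-- ===== Notes on version B (the rewrite author's own statement) =====
-- stated objective: simpler
-- what changed: B first finds the cut index (the first gap position, defaulting to len) and then returns a single slice, instead of A's incremental append loop with a break.
import Mathlib
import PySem

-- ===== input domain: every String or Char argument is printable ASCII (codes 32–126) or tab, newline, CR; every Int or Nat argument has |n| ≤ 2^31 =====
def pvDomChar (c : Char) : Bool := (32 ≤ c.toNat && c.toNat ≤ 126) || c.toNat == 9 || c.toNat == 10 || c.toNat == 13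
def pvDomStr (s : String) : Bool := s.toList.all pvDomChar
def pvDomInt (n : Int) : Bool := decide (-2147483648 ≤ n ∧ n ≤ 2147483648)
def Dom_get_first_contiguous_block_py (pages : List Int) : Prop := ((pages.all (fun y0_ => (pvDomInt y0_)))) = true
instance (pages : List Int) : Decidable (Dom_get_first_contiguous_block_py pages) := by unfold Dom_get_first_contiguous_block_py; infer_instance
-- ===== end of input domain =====

-- B computes the cut index (first gap position, default len) and returns one slice,
-- instead of A's incremental append loop with a break. Objective: simpler decomposition.

-- ===== PORT A =====
-- A's loop 'for i in range(1, len(pages))' with break, appending pages[i] while contiguous.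
-- Indices are always in range, so pages.getD i 0 is exact for pages[i].
def pvGoA (pages : List Int) (i : Nat) (acc : List Int) : List Int :=
  if i < pages.length then
    if pages.getD i 0 = pages.getD (i - 1) 0 + 1 then
      pvGoA pages (i + 1) (acc ++ [pages.getD i 0])
    else acc
  else acc
termination_by pages.length - i

def get_first_contiguous_block_py (pages : List Int) : List Int :=
  match pages with
  | [] => []
  | p :: _ => pvGoA pages 1 [p]

-- ===== PORT B =====
-- cut = next((i for i in range(1, n) if pages[i] != pages[i-1] + 1), n); return pages[:cut]
def pvCutB (pages : List Int) (i : Nat) : Nat :=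
  if i < pages.length then
    if pages.getD i 0 ≠ pages.getD (i - 1) 0 + 1 then i
    else pvCutB pages (i + 1)
  else pages.length
termination_by pages.length - i

def get_first_contiguous_block_py_alt (pages : List Int) : List Int :=
  PySem.List.slice pages none (some ((pvCutB pages 1 : Nat) : Int))

-- ===== PRECONDITION & SPEC =====
def Spec_get_first_contiguous_block_py (pages : List Int) (out : List Int) : Prop := out = get_first_contiguous_block_py_alt pages
instance (pages : List Int) (out : List Int) : Decidable (Spec_get_first_contiguous_block_py pages out) := by unfold Spec_get_first_contiguous_block_py; infer_instance

-- ===== CLAIM (what is proved, stated in full; the proofs are below) =====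
def Claim_equal_get_first_contiguous_block_py : Prop := ∀ (pages : List Int), Dom_get_first_contiguous_block_py pages → Spec_get_first_contiguous_block_py pages (get_first_contiguous_block_py pages)

-- ===== LEMMAS AND PROOFS =====

theorem pvGoA_eq_take (pages : List Int) (i : Nat) :
    pvGoA pages i (pages.take i) = pages.take (pvCutB pages i) := by
  rw [pvGoA, pvCutB]
  by_cases h : i < pages.length
  · simp only [h, if_true]
    by_cases hc : pages.getD i 0 = pages.getD (i - 1) 0 + 1
    · simp only [hc, if_true, ne_eq, not_true_eq_false, if_false]
      have ht : pages.take i ++ [pages.getD i 0] = pages.take (i + 1) := by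
        rw [List.take_add_one]
        congr 1
        simp [List.getD, List.getElem?_eq_getElem h]
      rw [← hc, ht]
      exact pvGoA_eq_take pages (i + 1)
    · simp only [hc, if_false, ne_eq, not_false_eq_true, if_true]
  · simp only [h, if_false]
    rw [List.take_of_length_le (by omega), List.take_length]
termination_by pages.length - i

-- ===== VERDICT (by name: the statement is the Claim_ definition above) =====
theorem get_first_contiguous_block_py_spec : Claim_equal_get_first_contiguous_block_py := by
  intro pages _
  unfold Spec_get_first_contiguous_block_py get_first_contiguous_block_py_alt
  rw [PySem.List.slice_to_natCast]
  cases pages with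
  | nil => simp [get_first_contiguous_block_py]
  | cons p rest =>
    show pvGoA (p :: rest) 1 [p] = _
    have h1 : [p] = (p :: rest).take 1 := by simp
    rw [h1, pvGoA_eq_take]
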